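-- pv_equiv track=rewrite | github.com/AlibabaResearch/AdvancedLiterateMachinery | DocumentUnderstanding/WebRPG/css_utils/utils.py | get_doc_tokens
-- ===== SOURCE A (Python) =====
-- def get_doc_tokens(page_text):
--     doc_tokens = []
--     prev_is_whitespace = True
--     for c in page_text:
--         if is_whitespace(c):
--             prev_is_whitespace = True
--         else:
--             if prev_is_whitespace:
--                 doc_tokens.append(c)
--             else:
--                 doc_tokens[-1] += c
--             prev_is_whitespace = False
--     return doc_tokens
--
-- def is_whitespace(c):
--     if c == " " or c == "\t" or c == "\r" or c == "\n" or ord(c) == 0x202F: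
--         return True
--     return False
-- ===== SOURCE B (Python) =====
-- def get_doc_tokens(page_text):
--     ws = (" ", "\t", "\r", "\n", "\u202f")
--     tokens = []
--     start = -1
--     for i, c in enumerate(page_text):
--         if c in ws:
--             if start >= 0:
--                 tokens.append(page_text[start:i])
--                 start = -1
--         else:
--             if start < 0:
--                 start = i
--     if start >= 0:
--         tokens.append(page_text[start:])
--     return tokens
-- ===== Notes on version B (the rewrite author's own statement) =====
-- stated objective: faster
-- what changed: A grows the last token by repeated string concatenation (doc_tokens[-1] += c, quadratic on long tokens); B does a single pass remembering the token's start index and slices the text once per token boundary.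
import Mathlib
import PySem

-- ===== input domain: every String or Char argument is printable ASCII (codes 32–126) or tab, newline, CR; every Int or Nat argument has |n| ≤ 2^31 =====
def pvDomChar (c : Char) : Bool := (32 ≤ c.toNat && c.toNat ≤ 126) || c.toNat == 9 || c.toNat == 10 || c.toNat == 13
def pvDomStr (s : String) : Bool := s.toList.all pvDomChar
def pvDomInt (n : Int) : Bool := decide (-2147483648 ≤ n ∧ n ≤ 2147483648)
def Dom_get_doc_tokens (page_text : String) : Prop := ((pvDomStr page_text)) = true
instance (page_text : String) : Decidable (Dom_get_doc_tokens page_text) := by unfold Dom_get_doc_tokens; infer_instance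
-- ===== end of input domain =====

-- B replaces A's quadratic grow-the-last-string accumulation by a single pass that
-- remembers the token's start index and slices once per token (objective: faster).

-- ===== PORT A =====
-- is_whitespace(c) of A, exact: the chained == tests plus ord(c) == 0x202F
def pvIsWhitespace (c : Char) : Bool :=
  c == ' ' || c == '\t' || c == '\r' || c == '\n' || c.toNat == 0x202F

-- doc_tokens[-1] += c (tokens kept as List Char; only reached with doc_tokens nonempty)
def pvAppendLast (ts : List (List Char)) (c : Char) : List (List Char) :=
  match ts with
  | [] => []
  | [t] => [t ++ [c]]
  | t :: rest => t :: pvAppendLast rest c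

def pvAStep (st : List (List Char) × Bool) (c : Char) : List (List Char) × Bool :=
  if pvIsWhitespace c then (st.1, true)
  else if st.2 then (st.1 ++ [[c]], false)
  else (pvAppendLast st.1 c, false)

def get_doc_tokens (page_text : String) : List String :=
  ((page_text.toList.foldl pvAStep ([], true)).1).map (fun t => String.ofList t)

-- ===== PORT B =====
-- the tuple ws of Source B; 'c in ws' is List.contains
def pvWsList : List Char := [' ', '\t', '\r', '\n', '\u202F']

def pvBStep (cs : List Char) (st : List (List Char) × Int) (p : Int × Char) : List (List Char) × Int :=
  if pvWsList.contains p.2 then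
    if st.2 ≥ 0 then (st.1 ++ [PySem.List.slice cs (some st.2) (some p.1)], -1) else st
  else
    if st.2 < 0 then (st.1, p.1) else st

def get_doc_tokens_alt (page_text : String) : List String :=
  let cs := page_text.toList
  let st := (PySem.List.enumerate cs 0).foldl (pvBStep cs) ([], -1)
  let toks := if st.2 ≥ 0 then st.1 ++ [PySem.List.slice cs (some st.2) none] else st.1
  toks.map (fun t => String.ofList t)

-- ===== PRECONDITION & SPEC =====
def Spec_get_doc_tokens (page_text : String) (out : List String) : Prop := out = get_doc_tokens_alt page_text
instance (page_text : String) (out : List String) : Decidable (Spec_get_doc_tokens page_text out) := by unfold Spec_get_doc_tokens; infer_instance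

-- ===== CLAIM (what is proved, stated in full; the proofs are below) =====
def Claim_equal_get_doc_tokens : Prop := ∀ (page_text : String), Dom_get_doc_tokens page_text → Spec_get_doc_tokens page_text (get_doc_tokens page_text)

-- ===== LEMMAS AND PROOFS =====

lemma pv_toNat_beq (c : Char) : (c.toNat == 0x202F) = (c == '\u202F') := by
  by_cases h : c = '\u202F'
  · subst h; rfl
  · have h2 : (c == '\u202F') = false := by simp [h]
    rw [h2, beq_eq_false_iff_ne]
    intro hn
    have hv : c.val = 8239 := by
      unfold Char.toNat at hn
      exact UInt32.toNat_inj.mp (by simpa using hn)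
    exact h (Char.ext hv)

lemma pv_ws_eq (c : Char) : pvWsList.contains c = pvIsWhitespace c := by
  simp only [pvWsList, pvIsWhitespace, List.contains_cons, List.contains_nil, Bool.or_false,
    pv_toNat_beq, Bool.or_assoc]

lemma pv_appendLast_snoc (tb : List (List Char)) (t : List Char) (c : Char) :
    pvAppendLast (tb ++ [t]) c = tb ++ [t ++ [c]] := by
  induction tb with
  | nil => rfl
  | cons x xs ih =>
    cases xs with
    | nil => rfl
    | cons y ys =>
      simp only [List.cons_append, pvAppendLast, List.cons.injEq, true_and] at ih ⊢
      simpa using ih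

lemma pv_loop (cs : List Char) :
    ∀ (rest : List Char) (i : Nat) (ta tb : List (List Char)) (pw : Bool) (s : Int),
    cs.drop i = rest →
    (pw = true → s = -1 ∧ tb = ta) →
    (pw = false → ∃ j : Nat, s = (j : Int) ∧ j < i ∧ ta = tb ++ [(cs.drop j).take (i - j)]) →
    (rest.foldl pvAStep (ta, pw)).1 =
      (let st := ((PySem.List.enumerate rest (i : Int)).foldl (pvBStep cs) (tb, s));
       if st.2 ≥ 0 then st.1 ++ [PySem.List.slice cs (some st.2) none] else st.1) := by
  intro rest
  induction rest with
  | nil =>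
    intro i ta tb pw s hdrop hT hF
    cases pw with
    | true =>
      obtain ⟨hs, htb⟩ := hT rfl
      simp [PySem.List.enumerate_nil, hs, htb]
    | false =>
      obtain ⟨j, hs, hji, hta⟩ := hF rfl
      have hlen : cs.length ≤ i := by
        by_contra hn
        have := List.drop_eq_nil_iff.mp hdrop
        omega
      have htake : (cs.drop j).take (i - j) = cs.drop j := by
        apply List.take_of_length_le
        simp [List.length_drop]; omega
      simp only [PySem.List.enumerate_nil, List.foldl_nil, hs]
      rw [if_pos (by exact_mod_cast Int.natCast_nonneg j), PySem.List.slice_from_natCast, hta, htake]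
  | cons c rest' ih =>
    intro i ta tb pw s hdrop hT hF
    have hlt : i < cs.length := by
      by_contra hn
      rw [List.drop_eq_nil_of_le (by omega)] at hdrop; simp at hdrop
    have hdrop' : cs.drop (i + 1) = rest' := by
      have h1 : cs.drop (i + 1) = (cs.drop i).drop 1 := by rw [List.drop_drop]
      rw [h1, hdrop]; rfl
    rw [PySem.List.enumerate_cons]
    simp only [List.foldl_cons]
    have hcast : (i : Int) + 1 = ((i + 1 : Nat) : Int) := by push_cast; ring
    rw [hcast]
    by_cases hw : pvIsWhitespace c = true
    · -- whitespace character
      have hA : pvAStep (ta, pw) c = (ta, true) := by simp [pvAStep, hw]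
      rw [hA]
      cases pw with
      | true =>
        obtain ⟨hs, htb⟩ := hT rfl
        have hB : pvBStep cs (tb, s) ((i : Int), c) = (tb, s) := by
          simp only [pvBStep, pv_ws_eq, hw]
          simp [hs]
        rw [hB, hs, htb]
        exact ih (i + 1) ta ta true (-1) hdrop' (fun _ => ⟨rfl, rfl⟩) (by simp)
      | false =>
        obtain ⟨j, hs, hji, hta⟩ := hF rfl
        have hB : pvBStep cs (tb, s) ((i : Int), c) =
            (tb ++ [PySem.List.slice cs (some s) (some (i : Int))], -1) := by
          simp only [pvBStep, pv_ws_eq, hw]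
          simp [hs]
        rw [hB, hs, PySem.List.slice_natCast, ← hta]
        exact ih (i + 1) ta ta true (-1) hdrop' (fun _ => ⟨rfl, rfl⟩) (by simp)
    · -- non-whitespace character
      rw [Bool.not_eq_true] at hw
      have hwB : pvWsList.contains c = false := by rw [pv_ws_eq, hw]
      cases pw with
      | true =>
        obtain ⟨hs, htb⟩ := hT rfl
        have hA : pvAStep (ta, true) c = (ta ++ [[c]], false) := by
          simp [pvAStep, hw]
        have hB : pvBStep cs (tb, s) ((i : Int), c) = (tb, (i : Int)) := by
          simp only [pvBStep, hwB]
          simp [hs]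
        rw [hA, hB, htb]
        refine ih (i + 1) (ta ++ [[c]]) ta false (i : Int) hdrop' (by simp) ?_
        intro _
        refine ⟨i, rfl, by omega, ?_⟩
        have : (cs.drop i).take (i + 1 - i) = [c] := by
          rw [hdrop]
          simp
        rw [this]
      | false =>
        obtain ⟨j, hs, hji, hta⟩ := hF rfl
        have hA : pvAStep (ta, false) c = (pvAppendLast ta c, false) := by
          simp [pvAStep, hw]
        have hB : pvBStep cs (tb, s) ((i : Int), c) = (tb, s) := by
          simp only [pvBStep, hwB]
          simp [hs]
        rw [hA, hB, hs]
        refine ih (i + 1) (pvAppendLast ta c) tb false (j : Int) hdrop' (by simp) ?_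
        intro _
        refine ⟨j, rfl, by omega, ?_⟩
        rw [hta, pv_appendLast_snoc]
        congr 1
        have hlen2 : i - j < (cs.drop j).length := by simp [List.length_drop]; omega
        have he : i + 1 - j = (i - j) + 1 := by omega
        rw [he, List.take_add_one]
        have h0 : (cs.drop j)[i - j]? = cs[j + (i - j)]? := List.getElem?_drop
        have h1 : (cs.drop i)[0]? = cs[i + 0]? := List.getElem?_drop
        rw [hdrop] at h1
        have hc : cs[i]? = some c := by simpa using h1.symm
        have hji2 : j + (i - j) = i := by omega
        rw [hji2] at h0
        simp [h0, hc]

-- ===== VERDICT (by name: the statement is the Claim_ definition above) =====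
theorem get_doc_tokens_spec : Claim_equal_get_doc_tokens := by
  intro page_text _
  unfold Spec_get_doc_tokens get_doc_tokens get_doc_tokens_alt
  have h := pv_loop page_text.toList page_text.toList 0 [] [] true (-1)
    (by simp) (fun _ => ⟨rfl, rfl⟩) (by simp)
  simp only [Nat.cast_zero] at h
  simp only [h]
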